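-- pv_equiv track=rewrite | github.com/pokerdio/generic | euler/euler-119.py | maxhope
-- ===== SOURCE A (Python) =====
-- def digisum(n):
--     s = 0
--     while n > 0:
--         s += n % 10
--         n //= 10
--     return s
--
-- def maxhope(n=100):
--     ret = {}
--     for nines in range(1, n):
--         for first_digit in range(1, 10):
--             k = (first_digit + 1) * 10 ** nines - 1
--
--             for p in range(2, 100):
--                 if digisum(k) ** p < k and p not in ret:
--                     ret[p] = digisum(k)
--
--     return ret
-- ===== SOURCE B (Python) =====
-- def maxhope(n=100):
--     items = []
--     p = 2
--     for nines in range(1, n):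
--         for first_digit in range(1, 10):
--             ds = first_digit + 9 * nines
--             k = (first_digit + 1) * 10 ** nines - 1
--             while p < 100 and ds ** p < k:
--                 items.append((p, ds))
--                 p += 1
--     return dict(items)
-- ===== Notes on version B (the rewrite author's own statement) =====
-- stated objective: faster
-- what changed: B replaces A's per-(nines,first_digit) rescan of the whole exponent range with repeated digisum(k) calls by a single monotonically advancing exponent pointer (exploiting that ds**p is increasing in p, so filled exponents form a contiguous prefix) and the closed-form digit sum first_digit + nine times nines, building the dict's item list directly in insertion order.
import Mathlib
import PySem

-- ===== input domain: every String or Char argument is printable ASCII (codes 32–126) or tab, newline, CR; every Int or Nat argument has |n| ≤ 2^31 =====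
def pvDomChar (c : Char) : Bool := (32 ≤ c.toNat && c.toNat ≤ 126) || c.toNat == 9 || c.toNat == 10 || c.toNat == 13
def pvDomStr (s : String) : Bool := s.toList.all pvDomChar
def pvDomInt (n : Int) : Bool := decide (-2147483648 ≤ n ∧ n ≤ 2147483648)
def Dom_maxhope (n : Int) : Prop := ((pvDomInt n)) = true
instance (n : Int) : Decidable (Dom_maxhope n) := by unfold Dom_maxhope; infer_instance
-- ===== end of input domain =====

-- B replaces A's per-(nines,digit) rescan of the whole exponent range (with repeated digisum calls)
-- by a single advancing exponent pointer and a closed-form digit sum (measured faster, constant-factor).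

-- ===== PORT A =====
def digisumAux (n s : Int) : Int :=
  if n > 0 then
    digisumAux (PySem.Int.floordiv n 10) (s + PySem.Int.mod n 10)
  else s
termination_by n.toNat
decreasing_by
  rw [PySem.Int.floordiv_eq_ediv_of_pos (by omega : (0:Int) < 10)]
  omega

def digisum (n : Int) : Int := digisumAux n 0

def maxhope (n : Int) : List (Int × Int) :=
  ((PySem.List.pyRange 1 n 1).foldl (fun ret nines =>
    (PySem.List.pyRange 1 10 1).foldl (fun ret fd =>
      let k := (fd + 1) * 10 ^ nines.toNat - 1
      (PySem.List.pyRange 2 100 1).foldl (fun ret p =>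
        if digisum k ^ p.toNat < k ∧ ¬(ret.contains p = true) then ret.insert p (digisum k)
        else ret) ret) ret)
    (PySem.Dict.empty)).items

-- ===== PORT B =====
def bWhile (ds k : Int) (items : List (Int × Int)) (p : Int) : List (Int × Int) × Int :=
  if h : p < 100 ∧ ds ^ p.toNat < k then
    bWhile ds k (items ++ [(p, ds)]) (p + 1)
  else (items, p)
termination_by (100 - p).toNat
decreasing_by omega

def maxhope_alt (n : Int) : List (Int × Int) :=
  ((PySem.List.pyRange 1 n 1).foldl
    (fun st nines =>
      (PySem.List.pyRange 1 10 1).foldl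
        (fun st fd =>
          let ds := fd + 9 * nines
          let k := (fd + 1) * 10 ^ nines.toNat - 1
          bWhile ds k st.1 st.2)
        st)
    (([], 2) : List (Int × Int) × Int)).1

-- ===== PRECONDITION & SPEC =====
def Spec_maxhope (n : Int) (out : List (Int × Int)) : Prop := out = maxhope_alt n
instance (n : Int) (out : List (Int × Int)) : Decidable (Spec_maxhope n out) := by unfold Spec_maxhope; infer_instance

-- ===== CLAIM (what is proved, stated in full; the proofs are below) =====
def Claim_equal_maxhope : Prop := ∀ (n : Int), Dom_maxhope n → Spec_maxhope n (maxhope n)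

-- ===== LEMMAS AND PROOFS =====

theorem digisumAux_eq (n s : Int) : digisumAux n s =
    if n > 0 then digisumAux (PySem.Int.floordiv n 10) (s + PySem.Int.mod n 10) else s := by
  rw [digisumAux]

theorem bWhile_eq (ds k : Int) (items : List (Int × Int)) (p : Int) : bWhile ds k items p =
    if p < 100 ∧ ds ^ p.toNat < k then bWhile ds k (items ++ [(p, ds)]) (p + 1) else (items, p) := by
  rw [bWhile]; rw [dite_eq_ite]

theorem digisumAux_acc (m : Nat) : ∀ n s : Int, n.toNat = m → digisumAux n s = s + digisumAux n 0 := by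
  induction m using Nat.strong_induction_on with
  | _ m ih =>
    intro n s hm
    by_cases h : n > 0
    · have hd : PySem.Int.floordiv n 10 = n / 10 := PySem.Int.floordiv_eq_ediv_of_pos (by omega)
      have hlt : (PySem.Int.floordiv n 10).toNat < m := by rw [hd]; omega
      rw [digisumAux_eq n s, digisumAux_eq n 0, if_pos h, if_pos h,
          ih _ hlt _ (s + PySem.Int.mod n 10) rfl, ih _ hlt _ (0 + PySem.Int.mod n 10) rfl]
      ring
    · rw [digisumAux_eq n s, digisumAux_eq n 0, if_neg h, if_neg h]; ring

theorem digisum_nines (m : Nat) : ∀ f : Int, 1 ≤ f → f ≤ 9 →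
    digisum ((f + 1) * 10 ^ m - 1) = f + 9 * (m : Int) := by
  induction m with
  | zero =>
    intro f h1 h9
    have hf : (f + 1) * 10 ^ 0 - 1 = f := by ring
    rw [hf]
    unfold digisum
    rw [digisumAux_eq, if_pos (by omega),
        PySem.Int.floordiv_eq_ediv_of_pos (by omega : (0:Int) < 10),
        PySem.Int.mod_eq_emod_of_pos (by omega : (0:Int) < 10)]
    have h10 : f / 10 = 0 := by omega
    have hm : f % 10 = f := by omega
    rw [h10, hm, digisumAux_eq, if_neg (by omega)]
    simp
  | succ m ih =>
    intro f h1 h9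
    have hten : (0:Int) < 10 ^ m := pow_pos (by norm_num) m
    have hk : (f + 1) * 10 ^ (m + 1) - 1 = 10 * ((f + 1) * 10 ^ m - 1) + 9 := by ring
    unfold digisum
    rw [hk, digisumAux_eq, if_pos (by nlinarith),
        PySem.Int.floordiv_eq_ediv_of_pos (by omega : (0:Int) < 10),
        PySem.Int.mod_eq_emod_of_pos (by omega : (0:Int) < 10)]
    have hdiv : (10 * ((f + 1) * 10 ^ m - 1) + 9) / 10 = (f + 1) * 10 ^ m - 1 := by omega
    have hmod : (10 * ((f + 1) * 10 ^ m - 1) + 9) % 10 = 9 := by omega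
    rw [hdiv, hmod, digisumAux_acc ((f + 1) * 10 ^ m - 1).toNat _ _ rfl]
    have hih := ih f h1 h9
    unfold digisum at hih
    rw [hih]
    push_cast
    ring

def stepA (v k : Int) (d : PySem.Dict Int Int) (p : Int) : PySem.Dict Int Int :=
  if v ^ p.toNat < k ∧ ¬(d.contains p = true) then d.insert p v else d

def InvR (d : PySem.Dict Int Int) (st : List (Int × Int) × Int) : Prop :=
  d.items = st.1 ∧ d.keys = PySem.List.pyRange 2 st.2 1 ∧ 2 ≤ st.2 ∧ st.2 ≤ 100

theorem foldA_noop (v k : Int) : ∀ (L : List Int) (d : PySem.Dict Int Int),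
    (∀ p ∈ L, d.contains p = true) → L.foldl (stepA v k) d = d := by
  intro L
  induction L with
  | nil => intro d _; rfl
  | cons p L ihL =>
    intro d h
    have hc := h p (List.mem_cons_self ..)
    rw [List.foldl_cons, show stepA v k d p = d by simp [stepA, hc]]
    exact ihL d (fun q hq => h q (List.mem_cons_of_mem _ hq))

theorem foldA_fail (v k : Int) : ∀ (L : List Int) (d : PySem.Dict Int Int),
    (∀ p ∈ L, ¬ v ^ p.toNat < k) → L.foldl (stepA v k) d = d := by
  intro L
  induction L with
  | nil => intro d _; rfl
  | cons p L ihL =>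
    intro d h
    have hc := h p (List.mem_cons_self ..)
    rw [List.foldl_cons, show stepA v k d p = d by simp [stepA, hc]]
    exact ihL d (fun q hq => h q (List.mem_cons_of_mem _ hq))

theorem pyRange_split (a b c : Int) (hab : a ≤ b) (hbc : b ≤ c) :
    PySem.List.pyRange a c 1 = PySem.List.pyRange a b 1 ++ PySem.List.pyRange b c 1 := by
  rw [PySem.List.pyRange_one a c, PySem.List.pyRange_one a b, PySem.List.pyRange_one b c]
  have h : (c - a).toNat = (b - a).toNat + (c - b).toNat := by omega
  rw [h, List.range_add, List.map_append, List.map_map]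
  congr 1
  refine List.map_congr_left (fun x _ => ?_)
  simp only [Function.comp]
  omega

theorem inner_main (v k : Int) (hv : 1 ≤ v) (m : Nat) :
    ∀ (p0 : Int) (d : PySem.Dict Int Int), (100 - p0).toNat = m → 2 ≤ p0 → p0 ≤ 100 →
    d.keys = PySem.List.pyRange 2 p0 1 →
    ((PySem.List.pyRange p0 100 1).foldl (stepA v k) d).items = (bWhile v k d.items p0).1 ∧
    ((PySem.List.pyRange p0 100 1).foldl (stepA v k) d).keys =
      PySem.List.pyRange 2 (bWhile v k d.items p0).2 1 ∧
    2 ≤ (bWhile v k d.items p0).2 ∧ (bWhile v k d.items p0).2 ≤ 100 := by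
  induction m using Nat.strong_induction_on with
  | _ m ih =>
    intro p0 d hm h2 h100 hkeys
    by_cases hlt : p0 < 100
    · rw [PySem.List.pyRange_one_cons hlt, List.foldl_cons]
      have hnc : d.contains p0 = false := by
        rw [Bool.eq_false_iff]
        intro hc
        have hmem := (PySem.Dict.contains_iff_mem_keys d p0).1 hc
        rw [hkeys, PySem.List.mem_pyRange_one] at hmem
        omega
      by_cases hcond : v ^ p0.toNat < k
      · rw [show stepA v k d p0 = d.insert p0 v by simp [stepA, hcond, hnc],
            bWhile_eq, if_pos ⟨hlt, hcond⟩]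
        have hkeys' : (d.insert p0 v).keys = PySem.List.pyRange 2 (p0 + 1) 1 := by
          rw [PySem.Dict.keys_insert_of_not_contains d v hnc, hkeys,
              PySem.List.pyRange_one_succ_right h2]
        have H := ih (100 - (p0 + 1)).toNat (by omega) (p0 + 1) (d.insert p0 v) rfl
          (by omega) (by omega) hkeys'
        rw [PySem.Dict.items_insert_of_not_contains d v hnc] at H
        exact H
      · rw [show stepA v k d p0 = d by simp [stepA, hcond], bWhile_eq,
            if_neg (by intro hb; exact hcond hb.2)]
        have hfail : ∀ p ∈ PySem.List.pyRange (p0 + 1) 100 1, ¬ v ^ p.toNat < k := by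
          intro p hp
          rw [PySem.List.mem_pyRange_one] at hp
          have hmono : v ^ p0.toNat ≤ v ^ p.toNat := pow_le_pow_right₀ hv (by omega)
          omega
        rw [foldA_fail v k _ d hfail]
        exact ⟨rfl, hkeys, h2, by omega⟩
    · have h100' : p0 = 100 := by omega
      subst h100'
      have hnil : PySem.List.pyRange (100:Int) 100 1 = [] := by
        rw [PySem.List.pyRange_one]; simp
      rw [hnil, List.foldl_nil, bWhile_eq, if_neg (by intro hb; omega)]
      exact ⟨rfl, hkeys, h2, le_refl _⟩

theorem pair_step (nines fd : Int) (h1 : 1 ≤ fd) (h9 : fd < 10) (hn : 1 ≤ nines)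
    (d : PySem.Dict Int Int) (st : List (Int × Int) × Int) (hR : InvR d st) :
    InvR ((PySem.List.pyRange 2 100 1).foldl
        (fun ret p =>
          if digisum ((fd + 1) * 10 ^ nines.toNat - 1) ^ p.toNat <
              ((fd + 1) * 10 ^ nines.toNat - 1) ∧ ¬(ret.contains p = true) then
            ret.insert p (digisum ((fd + 1) * 10 ^ nines.toNat - 1))
          else ret) d)
      (bWhile (fd + 9 * nines) ((fd + 1) * 10 ^ nines.toNat - 1) st.1 st.2) := by
  obtain ⟨hi, hk, h2, h100⟩ := hR
  have hds : digisum ((fd + 1) * 10 ^ nines.toNat - 1) = fd + 9 * nines := by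
    rw [digisum_nines nines.toNat fd h1 (by omega)]
    omega
  rw [hds]
  have hfold : (fun (ret : PySem.Dict Int Int) (p : Int) =>
      if (fd + 9 * nines) ^ p.toNat < ((fd + 1) * 10 ^ nines.toNat - 1) ∧
          ¬(ret.contains p = true) then
        ret.insert p (fd + 9 * nines)
      else ret) = stepA (fd + 9 * nines) ((fd + 1) * 10 ^ nines.toNat - 1) := rfl
  rw [hfold, pyRange_split 2 st.2 100 h2 h100, List.foldl_append,
      foldA_noop _ _ _ d (fun p hp =>
        (PySem.Dict.contains_iff_mem_keys d p).2 (by rw [hk]; exact hp))]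
  have H := inner_main (fd + 9 * nines) ((fd + 1) * 10 ^ nines.toNat - 1)
    (by omega) (100 - st.2).toNat st.2 d rfl h2 h100 hk
  rw [hi] at H
  exact ⟨H.1, H.2.1, H.2.2.1, H.2.2.2⟩

theorem foldl_rel {α β γ : Type} (R : α → β → Prop) (f : α → γ → α) (g : β → γ → β) :
    ∀ (L : List γ), (∀ c ∈ L, ∀ a b, R a b → R (f a c) (g b c)) →
    ∀ a b, R a b → R (L.foldl f a) (L.foldl g b) := by
  intro L
  induction L with
  | nil => intro _ a b h; exact h
  | cons c L ihL =>
    intro hstep a b h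
    exact ihL (fun c' hc' => hstep c' (List.mem_cons_of_mem _ hc')) _ _
      (hstep c (List.mem_cons_self ..) a b h)

-- ===== VERDICT (by name: the statement is the Claim_ definition above) =====
theorem maxhope_spec : Claim_equal_maxhope := by
  unfold Claim_equal_maxhope
  intro n _
  unfold Spec_maxhope maxhope maxhope_alt
  have H := foldl_rel InvR
    (fun ret nines => (PySem.List.pyRange 1 10 1).foldl
      (fun ret fd => (PySem.List.pyRange 2 100 1).foldl
        (fun ret p =>
          if digisum ((fd + 1) * 10 ^ nines.toNat - 1) ^ p.toNat <
              ((fd + 1) * 10 ^ nines.toNat - 1) ∧ ¬(ret.contains p = true) then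
            ret.insert p (digisum ((fd + 1) * 10 ^ nines.toNat - 1))
          else ret) ret) ret)
    (fun st nines => (PySem.List.pyRange 1 10 1).foldl
      (fun st fd =>
        bWhile (fd + 9 * nines) ((fd + 1) * 10 ^ nines.toNat - 1) st.1 st.2) st)
    (PySem.List.pyRange 1 n 1)
    (fun nines hnines d st hR =>
      foldl_rel InvR _ _ (PySem.List.pyRange 1 10 1)
        (fun fd hfd d' st' hR' =>
          pair_step nines fd ((PySem.List.mem_pyRange_one).1 hfd).1
            ((PySem.List.mem_pyRange_one).1 hfd).2
            ((PySem.List.mem_pyRange_one).1 hnines).1 d' st' hR')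
        d st hR)
    PySem.Dict.empty ([], 2)
    ⟨rfl, by rw [PySem.List.pyRange_one]; simp [PySem.Dict.empty], by omega, by omega⟩
  exact H.1
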